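-- pv_equiv track=rewrite | github.com/systemadminbdofficials/ccparser | ccparser/formatter.py | format_card_number
-- ===== SOURCE A (Python) =====
-- def format_card_number(card_number: str, separator: str = " ") -> str:
--     """
--     Format a credit card number into groups of 4 digits.
--
--     For AMEX cards (15 digits), formats as 4-6-5 pattern.
--     For other cards, formats as 4-4-4-4 pattern.
--
--     Args:
--         card_number: The credit card number (digits only).
--         separator: The separator to use between groups (default: space).
--
--     Returns:
--         The formatted card number string.
--
--     Example:
--         >>> format_card_number("4111111111111111")
--         '4111 1111 1111 1111'
--         >>> format_card_number("378282246310005")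
--         '3782 822463 10005'
--     """
--     if not card_number:
--         return ""
--
--     # Clean any existing formatting
--     clean_number = "".join(c for c in card_number if c.isdigit())
--
--     # AMEX format: 4-6-5
--     if len(clean_number) == 15:
--         return f"{clean_number[:4]}{separator}{clean_number[4:10]}{separator}{clean_number[10:]}"
--
--     # Diners Club format: 4-6-4
--     if len(clean_number) == 14:
--         return f"{clean_number[:4]}{separator}{clean_number[4:10]}{separator}{clean_number[10:]}"
--
--     # Standard format: groups of 4
--     return separator.join(clean_number[i:i+4] for i in range(0, len(clean_number), 4))
-- ===== SOURCE B (Python) =====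
-- def format_card_number(card_number: str, separator: str = " ") -> str:
--     digits = "".join(c for c in card_number if c.isdigit())
--     if not digits:
--         return ""
--     n = len(digits)
--     if n == 15:
--         sizes = [4, 6, 5]          # AMEX
--     elif n == 14:
--         sizes = [4, 6, 4]          # Diners Club
--     else:
--         sizes = [4] * (n // 4) + ([n % 4] if n % 4 else [])
--     groups = []
--     rest = digits
--     for size in sizes:
--         groups.append(rest[:size])
--         rest = rest[size:]
--     return separator.join(groups)
-- ===== Notes on version B (the rewrite author's own statement) =====
-- stated objective: alternative
-- what changed: Replaces the branch-specific f-string slicing and the range(0,n,4) generator join by a single table of group sizes ([4,6,5]/[4,6,4]/4s-plus-remainder) consumed in one cutting pass over the cleaned digits.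
import Mathlib
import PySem

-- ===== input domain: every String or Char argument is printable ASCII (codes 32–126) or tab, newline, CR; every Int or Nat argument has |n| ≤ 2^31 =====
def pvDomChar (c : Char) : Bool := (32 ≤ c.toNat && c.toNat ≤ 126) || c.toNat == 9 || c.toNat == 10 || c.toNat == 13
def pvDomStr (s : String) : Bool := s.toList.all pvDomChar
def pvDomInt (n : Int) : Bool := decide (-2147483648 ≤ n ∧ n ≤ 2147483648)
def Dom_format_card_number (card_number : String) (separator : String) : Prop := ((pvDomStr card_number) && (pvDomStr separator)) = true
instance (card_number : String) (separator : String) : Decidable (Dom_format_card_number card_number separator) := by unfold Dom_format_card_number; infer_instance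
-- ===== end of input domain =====

-- B replaces A's branch-specific f-string slicing by a table of group sizes consumed
-- in one cutting pass (alternative decomposition, same cost).

-- ===== PORT A =====
def format_card_number (card_number : String) (separator : String) : String :=
  if card_number.toList = [] then ""   -- `if not card_number: return ""`
  else
    let clean := card_number.toList.filter (fun c => PySem.Chars.isdigit c)
    if clean.length = 15 then
      String.ofList (PySem.List.slice clean none (some 4) ++ separator.toList ++
        PySem.List.slice clean (some 4) (some 10) ++ separator.toList ++
        PySem.List.slice clean (some 10) none)
    else if clean.length = 14 then
      String.ofList (PySem.List.slice clean none (some 4) ++ separator.toList ++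
        PySem.List.slice clean (some 4) (some 10) ++ separator.toList ++
        PySem.List.slice clean (some 10) none)
    else
      String.ofList (PySem.Chars.join separator.toList
        ((PySem.List.pyRange 0 (clean.length : Int) 4).map
          (fun i => PySem.List.slice clean (some i) (some (i + 4)))))

-- ===== PORT B =====
-- group-size table: [4,6,5] / [4,6,4] / as many 4s as fit plus the remainder
def fcnSizes (n : Nat) : List Nat :=
  if n = 15 then [4, 6, 5]
  else if n = 14 then [4, 6, 4]
  else List.replicate (n / 4) 4 ++ (if n % 4 = 0 then [] else [n % 4])

-- the cutting loop: successive `rest[:size]` chunks, `rest = rest[size:]`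
def fcnCut : List Nat → List Char → List (List Char)
  | [], _ => []
  | s :: rest, ds => ds.take s :: fcnCut rest (ds.drop s)

def format_card_number_alt (card_number : String) (separator : String) : String :=
  let digits := card_number.toList.filter (fun c => PySem.Chars.isdigit c)
  if digits = [] then ""
  else String.ofList (PySem.Chars.join separator.toList (fcnCut (fcnSizes digits.length) digits))

-- ===== PRECONDITION & SPEC =====
def Spec_format_card_number (card_number : String) (separator : String) (out : String) : Prop := out = format_card_number_alt card_number separator
instance (card_number : String) (separator : String) (out : String) : Decidable (Spec_format_card_number card_number separator out) := by unfold Spec_format_card_number; infer_instance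

-- ===== CLAIM (what is proved, stated in full; the proofs are below) =====
def Claim_equal_format_card_number : Prop := ∀ (card_number : String) (separator : String), Dom_format_card_number card_number separator → Spec_format_card_number card_number separator (format_card_number card_number separator)

-- ===== LEMMAS AND PROOFS =====

-- A's range(0, n, 4) chunking equals B's generic size table, chunk by chunk
lemma fcn_chunkR : ∀ (n : Nat) (l : List Char), l.length = n →
    (List.range ((n + 3) / 4)).map (fun k => (l.drop (4 * k)).take 4) =
      fcnCut (List.replicate (n / 4) 4 ++ (if n % 4 = 0 then [] else [n % 4])) l := by
  intro n
  induction n using Nat.strong_induction_on with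
  | _ n ih =>
    intro l hl
    rcases Nat.lt_or_ge n 4 with h4 | h4
    · rcases Nat.eq_zero_or_pos n with h0 | h0
      · subst h0
        have : l = [] := List.length_eq_zero_iff.mp hl
        simp [this, fcnCut]
      · have h1 : (n + 3) / 4 = 1 := by omega
        have h2 : n / 4 = 0 := by omega
        have h3 : n % 4 = n := by omega
        have hne0 : ¬ n = 0 := by omega
        simp [h1, h2, h3, hne0, List.range_succ, fcnCut,
          List.take_of_length_le (by omega : l.length ≤ 4),
          List.take_of_length_le (by omega : l.length ≤ n)]
    · have h1 : (n + 3) / 4 = ((n - 4) + 3) / 4 + 1 := by omega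
      have h2 : n / 4 = (n - 4) / 4 + 1 := by omega
      have h3 : n % 4 = (n - 4) % 4 := by omega
      have ihd := ih (n - 4) (by omega) (l.drop 4) (by simp [hl])
      rw [h1, h2, h3, List.range_succ_eq_map]
      simp only [List.replicate_succ, List.map_cons, List.map_map, fcnCut,
        Nat.mul_zero, List.drop_zero, List.cons_append]
      refine congrArg₂ _ rfl ?_
      rw [← ihd]
      apply List.map_congr_left
      intro k _
      simp only [Function.comp, List.drop_drop]
      congr 2
      omega

lemma fcn_take_eq_self {l : List Char} {m : Nat} (h : l.length ≤ m) : l.take m = l :=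
  List.take_of_length_le h

-- ===== VERDICT =====
theorem format_card_number_spec : Claim_equal_format_card_number := by
  intro cn sep _
  unfold Spec_format_card_number format_card_number format_card_number_alt
  by_cases hcn : cn.toList = []
  · simp [hcn]
  · simp only [hcn, if_false]
    set l := cn.toList.filter (fun c => PySem.Chars.isdigit c) with hldef
    by_cases h15 : l.length = 15
    · have hne : ¬ l = [] := by intro h; simp [h] at h15
      rw [if_pos h15, if_neg hne]
      have : PySem.List.slice l none (some 4) = l.take 4 := by
        simpa using PySem.List.slice_to_natCast l 4
      rw [this]
      have : PySem.List.slice l (some 4) (some 10) = (l.drop 4).take 6 := by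
        have := PySem.List.slice_natCast_add l 4 6
        push_cast at this
        simpa using this
      rw [this]
      have : PySem.List.slice l (some 10) none = l.drop 10 := by
        simpa using PySem.List.slice_from_natCast l 10
      rw [this]
      rw [show fcnSizes l.length = [4, 6, 5] by rw [h15]; decide]
      simp only [fcnCut]
      rw [PySem.Chars.join_cons_cons, PySem.Chars.join_cons_cons, PySem.Chars.join_singleton]
      rw [List.drop_drop]
      rw [fcn_take_eq_self (by simp [h15] : (l.drop (4 + 6)).length ≤ 5)]
      simp [List.append_assoc]
    · by_cases h14 : l.length = 14
      · have hne : ¬ l = [] := by intro h; simp [h] at h14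
        rw [if_neg h15, if_pos h14, if_neg hne]
        have : PySem.List.slice l none (some 4) = l.take 4 := by
          simpa using PySem.List.slice_to_natCast l 4
        rw [this]
        have : PySem.List.slice l (some 4) (some 10) = (l.drop 4).take 6 := by
          have := PySem.List.slice_natCast_add l 4 6
          push_cast at this
          simpa using this
        rw [this]
        have : PySem.List.slice l (some 10) none = l.drop 10 := by
          simpa using PySem.List.slice_from_natCast l 10
        rw [this]
        rw [show fcnSizes l.length = [4, 6, 4] by rw [h14]; decide]
        simp only [fcnCut]
        rw [PySem.Chars.join_cons_cons, PySem.Chars.join_cons_cons, PySem.Chars.join_singleton]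
        rw [List.drop_drop]
        rw [fcn_take_eq_self (by simp [h14] : (l.drop (4 + 6)).length ≤ 4)]
        simp [List.append_assoc]
      · by_cases hle : l = []
        · simp [hle, PySem.List.pyRange_of_pos (0 : Int) 0 (by norm_num : (0:Int) < 4),
            PySem.Chars.join_nil]
        · rw [if_neg h15, if_neg h14, if_neg hle]
          rw [PySem.List.pyRange_of_pos 0 (l.length : Int) (by norm_num : (0:Int) < 4)]
          have hn0 : 0 < l.length := List.length_pos_iff.mpr hle
          have hm : (if (0 : Int) < (l.length : Int) then
              (((l.length : Int) - 0 + 4 - 1) / 4).toNat else 0) = (l.length + 3) / 4 := by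
            rw [if_pos (by exact_mod_cast hn0)]
            omega
          rw [hm, List.map_map]
          simp only [Function.comp_def]
          have hfun : ∀ k ∈ List.range ((l.length + 3) / 4),
              PySem.List.slice l (some (0 + 4 * (k : Int))) (some (0 + 4 * (k : Int) + 4)) =
                (l.drop (4 * k)).take 4 := by
            intro k _
            simp only [zero_add]
            have := PySem.List.slice_natCast_add l (4 * k) 4
            push_cast at this
            simpa using this
          rw [List.map_congr_left hfun]
          rw [fcn_chunkR l.length l rfl]
          rw [show fcnSizes l.length = List.replicate (l.length / 4) 4 ++
              (if l.length % 4 = 0 then [] else [l.length % 4]) by simp [fcnSizes, h15, h14]]
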